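-- pv_equiv track=rewrite | github.com/FrankDesogus/mdp_tool | core/parsers/bom_pdf_old.py | _tokenize_header_row
-- ===== SOURCE A (Python) =====
-- from typing import Any, Dict, List, Optional, Tuple
--
-- def _split_cell(cell: Any) -> List[str]:
--     """
--     pdfplumber spesso restituisce dati multi-riga in una sola cella con '\n'.
--     """
--     if cell is None:
--         return []
--     s = str(cell)
--     parts = [p.strip() for p in s.split("\n")]
--     return [p for p in parts if p and p.lower() != "null"]
--
-- def _tokenize_header_row(row: List[Any]) -> List[str]:
--     toks: List[str] = []
--     for cell in row or []:
--         for part in _split_cell(cell):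
--             part = part.strip()
--             if part:
--                 toks.append(part)
--     return toks
-- ===== SOURCE B (Python) =====
-- from typing import Any, List
--
-- def _tokenize_header_row(row: List[Any]) -> List[str]:
--     combined = "\n".join(str(cell) for cell in (row or []) if cell is not None)
--     return [t for t in (p.strip() for p in combined.split("\n"))
--             if t and t.lower() != "null"]
-- ===== Notes on version B (the rewrite author's own statement) =====
-- stated objective: faster
-- what changed: B joins the non-None cells into one newline-separated string and tokenizes it in a single split/strip/filter pass, instead of A's nested per-cell Python loop calling a per-cell splitter and re-stripping each part.
import Mathlib
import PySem

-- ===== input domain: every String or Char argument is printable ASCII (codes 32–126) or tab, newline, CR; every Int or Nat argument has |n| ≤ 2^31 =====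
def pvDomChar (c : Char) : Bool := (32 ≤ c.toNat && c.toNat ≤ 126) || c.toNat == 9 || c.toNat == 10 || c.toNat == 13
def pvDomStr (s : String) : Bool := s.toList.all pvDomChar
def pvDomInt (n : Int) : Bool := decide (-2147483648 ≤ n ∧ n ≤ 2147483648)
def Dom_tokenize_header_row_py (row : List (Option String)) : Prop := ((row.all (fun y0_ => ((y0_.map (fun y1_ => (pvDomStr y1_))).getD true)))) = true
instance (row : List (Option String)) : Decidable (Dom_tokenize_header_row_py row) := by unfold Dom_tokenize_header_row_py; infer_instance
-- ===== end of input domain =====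

-- B tokenizes by joining the non-None cells with '\n' and doing one split/strip/filter pass,
-- instead of A's nested per-cell loop with a per-cell splitter; measured constant-factor speedup (fewer interpreted per-cell loops).


-- ===== PORT A =====
-- _split_cell: None → []; else split on '\n', strip each part, keep truthy parts whose lower() ≠ "null"
def split_cell_py (cell : Option String) : List String :=
  match cell with
  | none => []
  | some s =>
    let parts := ((PySem.Str.split? s "\n").getD []).map PySem.Str.strip
    parts.filter (fun p => decide (p ≠ "") && decide (PySem.Str.lower p ≠ "null"))

def tokenize_header_row_py (row : List (Option String)) : List String :=
  -- 'row or []' : an empty list is replaced by []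
  (if row.isEmpty then [] else row).foldl
    (fun toks cell =>
      (split_cell_py cell).foldl
        (fun toks part =>
          let part := PySem.Str.strip part
          if part ≠ "" then toks ++ [part] else toks)
        toks)
    []

-- ===== PORT B =====
def tokenize_header_row_py_alt (row : List (Option String)) : List String :=
  let combined := PySem.Str.join "\n" ((if row.isEmpty then [] else row).filterMap (fun c => c))
  (((PySem.Str.split? combined "\n").getD []).map PySem.Str.strip).filter
    (fun t => decide (t ≠ "") && decide (PySem.Str.lower t ≠ "null"))

-- ===== PRECONDITION & SPEC =====
def Spec_tokenize_header_row_py (row : List (Option String)) (out : List String) : Prop := out = tokenize_header_row_py_alt row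
instance (row : List (Option String)) (out : List String) : Decidable (Spec_tokenize_header_row_py row out) := by unfold Spec_tokenize_header_row_py; infer_instance

-- ===== CLAIM (what is proved, stated in full; the proofs are below) =====
def Claim_equal_tokenize_header_row_py : Prop := ∀ (row : List (Option String)), Dom_tokenize_header_row_py row → Spec_tokenize_header_row_py row (tokenize_header_row_py row)

-- ===== LEMMAS AND PROOFS =====

-- simple one-character splitter on '\n', the reference form of PySem.Chars.splitOn · ['\n']
def split1 : List Char → List (List Char)
  | [] => [[]]
  | c :: rest => if c = '\n' then [] :: split1 rest else (split1 rest).modifyHead (c :: ·)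

theorem split1_ne_nil (l : List Char) : split1 l ≠ [] := by
  induction l with
  | nil => simp [split1]
  | cons c rest ih =>
    simp only [split1]
    split_ifs
    · simp
    · cases h : split1 rest with
      | nil => exact absurd h ih
      | cons a as => simp [List.modifyHead]

theorem go_eq (l : List Char) : ∀ (fuel : Nat) (cur : List Char) (acc : List (List Char)),
    l.length ≤ fuel →
    PySem.Chars.splitOn.go ['\n'] fuel l cur acc
      = acc.reverse ++ (split1 l).modifyHead (cur.reverse ++ ·) := by
  induction l with
  | nil =>
    intro fuel cur acc _
    cases fuel <;> simp [PySem.Chars.splitOn.go, split1, List.modifyHead]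
  | cons c rest ih =>
    intro fuel cur acc hf
    cases fuel with
    | zero => simp at hf
    | succ fuel =>
      simp only [List.length_cons, Nat.succ_le_succ_iff] at hf
      by_cases hc : c = '\n'
      · subst hc
        have hpre : List.isPrefixOf ['\n'] ('\n' :: rest) = true := by
          simp [List.isPrefixOf]
        rw [PySem.Chars.splitOn.go]
        simp only [hpre, if_pos]
        rw [show List.drop ['\n'].length ('\n' :: rest) = rest from rfl]
        rw [ih fuel [] (cur.reverse :: acc) (by simpa using hf)]
        cases h : split1 rest with
        | nil => exact absurd h (split1_ne_nil rest)
        | cons a as => simp [split1, h, List.modifyHead]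
      · have hpre : List.isPrefixOf ['\n'] (c :: rest) = false := by
          have hb : ('\n' == c) = false := beq_eq_false_iff_ne.mpr (fun h => hc h.symm)
          simp [List.isPrefixOf, hb]
        rw [PySem.Chars.splitOn.go]
        simp only [hpre, Bool.false_eq_true, if_false]
        rw [ih fuel (c :: cur) acc hf]
        have h2 := split1_ne_nil rest
        cases h : split1 rest with
        | nil => exact absurd h h2
        | cons a as => simp [split1, hc, h, List.modifyHead]

theorem splitOn_nl (l : List Char) : PySem.Chars.splitOn l ['\n'] = split1 l := by
  rw [PySem.Chars.splitOn, go_eq l (l.length + 1) [] [] (by omega)]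
  have h := split1_ne_nil l
  cases h' : split1 l with
  | nil => exact absurd h' h
  | cons a as => simp [List.modifyHead]

theorem split1_append (a b : List Char) :
    split1 (a ++ '\n' :: b) = split1 a ++ split1 b := by
  induction a with
  | nil => simp [split1]
  | cons c rest ih =>
    by_cases hc : c = '\n'
    · simp [split1, hc, ih]
    · have h2 := split1_ne_nil rest
      cases h : split1 rest with
      | nil => exact absurd h h2
      | cons x xs => simp [split1, hc, ih, h, List.modifyHead]

-- the char-level token pipeline shared by both ports
def tokC (s : List Char) : List (List Char) :=
  ((split1 s).map PySem.Chars.strip).filter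
    (fun t => decide (t ≠ []) && decide (PySem.Chars.lower t ≠ "null".toList))

theorem tokC_append (a b : List Char) : tokC (a ++ '\n' :: b) = tokC a ++ tokC b := by
  simp [tokC, split1_append]

theorem tokC_nil : tokC [] = [] := by decide

theorem tokC_intercalate (cells : List (List Char)) :
    tokC (List.intercalate ['\n'] cells) = (cells.map tokC).flatten := by
  induction cells with
  | nil => simpa [List.intercalate] using tokC_nil
  | cons c cs ih =>
    cases cs with
    | nil => simp [List.intercalate, List.intersperse]
    | cons d ds =>
      have : List.intercalate ['\n'] (c :: d :: ds) = c ++ '\n' :: List.intercalate ['\n'] (d :: ds) := by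
        simp [List.intercalate, List.intersperse]
      rw [this, tokC_append, ih]
      simp

-- strip facts
theorem dropWhile_idem {α : Type} (p : α → Bool) (l : List α) :
    List.dropWhile p (List.dropWhile p l) = List.dropWhile p l := by
  induction l with
  | nil => simp
  | cons c rest ih =>
    by_cases h : p c
    · simpa [List.dropWhile, h] using ih
    · simp [List.dropWhile, h]

theorem rstrip_idem (l : List Char) : PySem.Chars.rstrip (PySem.Chars.rstrip l) = PySem.Chars.rstrip l := by
  simp [PySem.Chars.rstrip, dropWhile_idem]

theorem strip_idem (l : List Char) : PySem.Chars.strip (PySem.Chars.strip l) = PySem.Chars.strip l := by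
  have hpre : PySem.Chars.rstrip (PySem.Chars.lstrip l) <+: PySem.Chars.lstrip l := by
    have h := List.dropWhile_suffix (l := (PySem.Chars.lstrip l).reverse) PySem.Chars.isspace
    unfold PySem.Chars.rstrip
    exact List.reverse_suffix.mp (by simpa using h)
  have hhead : PySem.Chars.lstrip (PySem.Chars.rstrip (PySem.Chars.lstrip l)) = PySem.Chars.rstrip (PySem.Chars.lstrip l) := by
    cases h : PySem.Chars.rstrip (PySem.Chars.lstrip l) with
    | nil => simp [PySem.Chars.lstrip]
    | cons c cs =>
      -- c is the head of lstrip l, hence not a space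
      obtain ⟨t, ht⟩ := hpre
      rw [h] at ht
      have hl3 : PySem.Chars.lstrip l = c :: (cs ++ t) := by rw [← ht]; simp
      have hc : PySem.Chars.isspace c = false := by
        have hself : List.dropWhile PySem.Chars.isspace (PySem.Chars.lstrip l) = PySem.Chars.lstrip l := by
          simp [PySem.Chars.lstrip, dropWhile_idem]
        have h0 := List.dropWhile_eq_self_iff.mp hself
        simp only [hl3] at h0
        simpa using h0 (by simp)
      simp [PySem.Chars.lstrip, List.dropWhile, hc]
  unfold PySem.Chars.strip
  rw [hhead, rstrip_idem]

-- the String-level pipeline both ports use, reduced to tokC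
theorem pipeline_eq (s : String) :
    (((PySem.Str.split? s "\n").getD []).map PySem.Str.strip).filter
      (fun t => decide (t ≠ "") && decide (PySem.Str.lower t ≠ "null"))
    = (tokC s.toList).map String.ofList := by
  have hsplit : PySem.Str.split? s "\n" = some ((PySem.Chars.splitOn s.toList ['\n']).map String.ofList) := by
    simp [PySem.Str.split?, PySem.Chars.split?]
  rw [hsplit]
  simp only [Option.getD_some, splitOn_nl, tokC, List.map_map]
  rw [show PySem.Str.strip ∘ String.ofList = String.ofList ∘ PySem.Chars.strip from
    funext fun l => by simp [PySem.Str.strip]]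
  rw [← List.map_map, List.filter_map]
  congr 1
  apply List.filter_congr
  intro t _
  have h1 : (String.ofList t ≠ "") ↔ (t ≠ []) := by
    constructor
    · intro h hc; apply h; rw [← String.toList_inj]; simpa using hc
    · intro h hc; apply h
      have := congrArg String.toList hc
      simpa using this
  have h2 : (PySem.Str.lower (String.ofList t) ≠ "null")
      ↔ (PySem.Chars.lower t ≠ "null".toList) := by
    constructor
    · intro h hc; apply h
      rw [← String.toList_inj, PySem.Str.toList_lower]
      simpa using hc
    · intro h hc; apply h
      have := congrArg String.toList hc
      rw [PySem.Str.toList_lower] at this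
      simpa using this
  simp only [Function.comp_apply]
  simp [h1, h2]

-- A's inner loop over already-stripped nonempty tokens is a plain append
theorem inner_foldl (ts : List (List Char)) : ∀ (toks : List String),
    (∀ t ∈ ts, PySem.Chars.strip t = t ∧ t ≠ []) →
    (ts.map String.ofList).foldl
      (fun toks part =>
        let part := PySem.Str.strip part
        if part ≠ "" then toks ++ [part] else toks)
      toks
    = toks ++ ts.map String.ofList := by
  induction ts with
  | nil => intro toks _; simp
  | cons t rest ih =>
    intro toks h
    obtain ⟨hs, hne⟩ := h t (by simp)
    have hstrip : PySem.Str.strip (String.ofList t) = String.ofList t := by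
      simp [PySem.Str.strip, hs]
    have hne' : String.ofList t ≠ "" := by
      intro hc; apply hne
      have := congrArg String.toList hc
      simpa using this
    simp only [List.map_cons, List.foldl_cons, hstrip, if_pos hne']
    rw [ih (toks ++ [String.ofList t]) (fun x hx => h x (by simp [hx]))]
    simp

-- every token produced by tokC is stripped and nonempty
theorem tokC_mem (s : List Char) (t : List Char) (ht : t ∈ tokC s) :
    PySem.Chars.strip t = t ∧ t ≠ [] := by
  unfold tokC at ht
  rw [List.mem_filter] at ht
  obtain ⟨hmem, hp⟩ := ht
  rw [List.mem_map] at hmem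
  obtain ⟨q, _, rfl⟩ := hmem
  refine ⟨strip_idem q, ?_⟩
  simp only [Bool.and_eq_true, decide_eq_true_eq] at hp
  exact hp.1

theorem split_cell_none : split_cell_py none = [] := rfl

theorem split_cell_eq (s : String) :
    split_cell_py (some s) = (tokC s.toList).map String.ofList := by
  simpa [split_cell_py] using pipeline_eq s

-- A's value, characterised
theorem A_fold (row : List (Option String)) : ∀ (init : List String),
    row.foldl
      (fun toks cell =>
        (split_cell_py cell).foldl
          (fun toks part =>
            let part := PySem.Str.strip part
            if part ≠ "" then toks ++ [part] else toks)
          toks)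
      init
    = init ++ (((row.filterMap (fun c => c)).map (fun s => tokC s.toList)).flatten).map String.ofList := by
  induction row with
  | nil => intro init; simp
  | cons x xs ih =>
    intro init
    cases x with
    | none =>
      simp only [List.foldl_cons, split_cell_none, List.foldl_nil]
      rw [ih]
      simp
    | some s =>
      simp only [List.foldl_cons]
      rw [split_cell_eq, inner_foldl _ _ (fun t ht => tokC_mem _ _ ht), ih]
      simp

theorem A_eq (row : List (Option String)) :
    tokenize_header_row_py row
      = (((row.filterMap (fun c => c)).map (fun s => tokC s.toList)).flatten).map String.ofList := by
  unfold tokenize_header_row_py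
  have hrow : (if row.isEmpty then [] else row) = row := by
    cases row <;> simp
  rw [hrow]
  simpa using A_fold row []

-- B's value, characterised
theorem B_eq (row : List (Option String)) :
    tokenize_header_row_py_alt row
      = (((row.filterMap (fun c => c)).map (fun s => tokC s.toList)).flatten).map String.ofList := by
  unfold tokenize_header_row_py_alt
  have hrow : (if row.isEmpty then [] else row) = row := by
    cases row <;> simp
  rw [hrow]
  have hjoin : (PySem.Str.join "\n" (row.filterMap (fun c => c))).toList
      = List.intercalate ['\n'] ((row.filterMap (fun c => c)).map String.toList) := by
    simp [PySem.Str.join, PySem.Chars.join]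
  rw [pipeline_eq, hjoin, tokC_intercalate]
  simp [List.map_map, Function.comp_def]

-- ===== VERDICT (by name: the statement is the Claim_ definition above) =====
theorem tokenize_header_row_py_spec : Claim_equal_tokenize_header_row_py := by
  intro row _
  unfold Spec_tokenize_header_row_py
  rw [A_eq, B_eq]
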